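-- pv_equiv track=rewrite | github.com/sunain-s/First-Order-Logic-Tableau | skeleton.py | has_contradiction
-- ===== SOURCE A (Python) =====
-- def has_contradiction(formulas: list[str]) -> bool:
--     '''Check for a contradiction in the branch list'''
--     for fmla in formulas:
--         if fmla.startswith('~'):
--             if fmla[1:] in formulas:
--                 return True
--         else:
--             if '~' + fmla in formulas:
--                 return True
--     return False
-- ===== SOURCE B (Python) =====
-- def has_contradiction(formulas: list[str]) -> bool:
--     '''Check for a contradiction in the branch list'''
--     present = set(formulas)
--     negated = {f[1:] for f in formulas if f.startswith('~')}
--     return bool(present & negated)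
-- ===== Notes on version B (the rewrite author's own statement) =====
-- stated objective: faster
-- what changed: Replaces A's per-formula loop with branches, inner linear membership scans and early return by building the set of present formulas and the set of stripped negations once and testing their intersection for non-emptiness.
import Mathlib
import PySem

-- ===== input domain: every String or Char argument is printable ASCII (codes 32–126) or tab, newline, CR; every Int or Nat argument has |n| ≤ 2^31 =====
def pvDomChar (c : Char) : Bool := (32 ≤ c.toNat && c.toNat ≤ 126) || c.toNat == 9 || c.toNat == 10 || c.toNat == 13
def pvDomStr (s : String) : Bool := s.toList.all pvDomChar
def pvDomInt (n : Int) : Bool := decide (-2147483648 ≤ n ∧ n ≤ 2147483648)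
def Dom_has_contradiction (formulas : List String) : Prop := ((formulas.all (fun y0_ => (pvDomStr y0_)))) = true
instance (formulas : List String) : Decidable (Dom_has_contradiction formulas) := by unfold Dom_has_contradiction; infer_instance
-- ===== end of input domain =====

-- B replaces A's quadratic scan-with-inner-membership loop by a two-set partition
-- (present formulas vs stripped negations) and one set intersection (objective: alternative).


-- ===== PORT A =====
-- the for-loop with early return, over the formulas as char lists ('all' is the full list
-- that the membership tests 'in formulas' consult)
def hcLoop (all : List (List Char)) : List (List Char) → Bool
  | [] => false
  | fmla :: rest =>
    if PySem.Chars.startswith fmla ['~'] then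
      if all.contains (PySem.List.slice fmla (some 1) none) then true else hcLoop all rest
    else
      if all.contains ('~' :: fmla) then true else hcLoop all rest

def has_contradiction (formulas : List String) : Bool :=
  hcLoop (formulas.map String.toList) (formulas.map String.toList)

-- ===== PORT B =====
def has_contradiction_alt (formulas : List String) : Bool :=
  let cs := formulas.map String.toList
  let present : PySem.Set (List Char) := PySem.Set.ofList cs
  let negated : PySem.Set (List Char) :=
    PySem.Set.ofList ((cs.filter (fun f => PySem.Chars.startswith f ['~'])).map
      (fun f => PySem.List.slice f (some 1) none))
  !(PySem.Set.inter present negated).isEmpty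

-- ===== PRECONDITION & SPEC =====
def Spec_has_contradiction (formulas : List String) (out : Bool) : Prop := out = has_contradiction_alt formulas
instance (formulas : List String) (out : Bool) : Decidable (Spec_has_contradiction formulas out) := by unfold Spec_has_contradiction; infer_instance

-- ===== CLAIM (what is proved, stated in full; the proofs are below) =====
def Claim_equal_has_contradiction : Prop := ∀ (formulas : List String), Dom_has_contradiction formulas → Spec_has_contradiction formulas (has_contradiction formulas)

-- ===== LEMMAS AND PROOFS =====

-- both programs decide this proposition: some formula starting with '~' has its stripped
-- body also present
def HasPair (cs : List (List Char)) : Prop :=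
  ∃ f ∈ cs, PySem.Chars.startswith f ['~'] = true ∧ f.tail ∈ cs

theorem startswith_tilde_iff (f : List Char) :
    PySem.Chars.startswith f ['~'] = true ↔ ∃ t, f = '~' :: t := by
  rw [PySem.Chars.startswith_iff]
  constructor
  · rintro ⟨t, rfl⟩; exact ⟨t, rfl⟩
  · rintro ⟨t, rfl⟩; exact ⟨t, rfl⟩

theorem hcLoop_true_iff (all rest : List (List Char)) :
    hcLoop all rest = true ↔
      ∃ f ∈ rest, (PySem.Chars.startswith f ['~'] = true ∧ f.tail ∈ all) ∨
        (¬ PySem.Chars.startswith f ['~'] = true ∧ ('~' :: f) ∈ all) := by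
  induction rest with
  | nil => simp [hcLoop]
  | cons f rest ih =>
    by_cases hs : PySem.Chars.startswith f ['~'] = true
    · by_cases hm : f.tail ∈ all
      · simp [hcLoop, hs, hm, PySem.List.slice_from_one]
      · simp [hcLoop, hs, hm, PySem.List.slice_from_one, ih]
    · by_cases hm : ('~' :: f) ∈ all
      · simp [hcLoop, hs, hm]
      · simp [hcLoop, hs, hm, ih]

theorem hcLoop_self_iff (cs : List (List Char)) :
    hcLoop cs cs = true ↔ HasPair cs := by
  rw [hcLoop_true_iff]
  constructor
  · rintro ⟨f, hf, h | h⟩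
    · exact ⟨f, hf, h⟩
    · refine ⟨'~' :: f, h.2, ?_, by simpa using hf⟩
      rw [startswith_tilde_iff]; exact ⟨f, rfl⟩
  · rintro ⟨f, hf, hs, ht⟩
    exact ⟨f, hf, Or.inl ⟨hs, ht⟩⟩

theorem alt_true_iff (formulas : List String) :
    has_contradiction_alt formulas = true ↔ HasPair (formulas.map String.toList) := by
  unfold has_contradiction_alt HasPair
  simp only [Bool.not_eq_eq_eq_not, Bool.not_true, List.isEmpty_eq_false_iff_exists_mem]
  constructor
  · rintro ⟨x, hx⟩
    rw [PySem.Set.mem_inter] at hx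
    obtain ⟨hp, hn⟩ := hx
    rw [PySem.Set.mem_ofList] at hp hn
    rw [List.mem_map] at hn
    obtain ⟨f, hf, rfl⟩ := hn
    rw [List.mem_filter] at hf
    obtain ⟨hf, hsw⟩ := hf
    exact ⟨f, hf, hsw, by rwa [PySem.List.slice_from_one] at hp⟩
  · rintro ⟨f, hf, hsw, ht⟩
    refine ⟨f.tail, ?_⟩
    rw [PySem.Set.mem_inter, PySem.Set.mem_ofList, PySem.Set.mem_ofList]
    refine ⟨ht, ?_⟩
    rw [List.mem_map]
    exact ⟨f, List.mem_filter.mpr ⟨hf, hsw⟩, by rw [PySem.List.slice_from_one]⟩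

-- ===== VERDICT (by name: the statement is the Claim_ definition above) =====
theorem has_contradiction_spec : Claim_equal_has_contradiction := by
  intro formulas _
  unfold Spec_has_contradiction
  rw [Bool.eq_iff_iff, alt_true_iff,
    show has_contradiction formulas = hcLoop (formulas.map String.toList) (formulas.map String.toList) from rfl,
    hcLoop_self_iff]
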